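-- pv_equiv track=rewrite | github.com/varshith-Git/Valori-Kernel | python/valori/chunking.py | naive_paragraph_chunker
-- ===== SOURCE A (Python) =====
-- from typing import List
--
-- def split_by_sentences(text: str, max_chars: int = 512) -> List[str]:
--     """
--     Deterministic, simple chunker:
--     - Split on '.', '?', '!'
--     - Each sentence normally becomes its own chunk.
--     - If a single sentence is longer than max_chars, we hard-split it into pieces.
--     """
--     if not text:
--         return []
--
--     delimiters = {'.', '?', '!'}
--     sentences: List[str] = []
--     current = ""
--
--     for ch in text:
--         current += ch
--         if ch in delimiters:
--             sent = current.strip()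
--             if sent:
--                 sentences.append(sent)
--             current = ""
--     # trailing text without punctuation
--     if current.strip():
--         sentences.append(current.strip())
--
--     chunks: List[str] = []
--     for sent in sentences:
--         if len(sent) <= max_chars:
--             chunks.append(sent)
--         else:
--             # Hard-split very long sentence
--             start = 0
--             while start < len(sent):
--                 chunks.append(sent[start:start + max_chars].strip())
--                 start += max_chars
--
--     return chunks
--
-- def naive_paragraph_chunker(text: str, max_chars: int = 512) -> List[str]:
--     """
--     Split on double newlines, then further break long paragraphs into max_chars chunks
--     (using sentence splitter for sub-chunking if needed, or simple char slice).
--     """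
--     paragraphs = [p.strip() for p in text.split('\n\n') if p.strip()]
--     chunks = []
--
--     for para in paragraphs:
--         if len(para) <= max_chars:
--             chunks.append(para)
--         else:
--             # Recursively use sentence splitter for big paragraphs
--             sub_chunks = split_by_sentences(para, max_chars)
--             chunks.extend(sub_chunks)
--
--     return chunks
-- ===== SOURCE B (Python) =====
-- from typing import List
--
-- def naive_paragraph_chunker(text: str, max_chars: int = 512) -> List[str]:
--     """Same chunking in one fused pass: paragraphs on '\n\n'; long paragraphs are
--     cut into raw sentence pieces by recording cut positions and slicing (instead of
--     a char-by-char accumulator), then stripped/filtered/hard-split in one place."""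
--     chunks: List[str] = []
--     for piece in text.split('\n\n'):
--         para = piece.strip()
--         if not para:
--             continue
--         if len(para) <= max_chars:
--             chunks.append(para)
--             continue
--         # sentence pieces via cut positions + slices (delimiter stays attached)
--         raw: List[str] = []
--         start = 0
--         for i, ch in enumerate(para):
--             if ch in '.?!':
--                 raw.append(para[start:i + 1])
--                 start = i + 1
--         raw.append(para[start:])
--         for r in raw:
--             sent = r.strip()
--             if not sent:
--                 continue
--             if len(sent) <= max_chars:
--                 chunks.append(sent)
--             else:
--                 chunks.extend(sent[j:j + max_chars].strip()
--                               for j in range(0, len(sent), max_chars))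
--     return chunks
-- ===== Notes on version B (the rewrite author's own statement) =====
-- stated objective: alternative
-- what changed: One fused pass over paragraphs; sentence pieces are produced by recording cut positions and slicing the paragraph (delimiters stay attached) instead of a char-by-char string accumulator, with stripping/filtering/hard-splitting done once on the raw pieces, and the hard split is a range-based comprehension instead of a while loop.
-- outside the precondition, e.g. on naive_paragraph_chunker('\n \n', 0): A returns [], B returns []
import Mathlib
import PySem

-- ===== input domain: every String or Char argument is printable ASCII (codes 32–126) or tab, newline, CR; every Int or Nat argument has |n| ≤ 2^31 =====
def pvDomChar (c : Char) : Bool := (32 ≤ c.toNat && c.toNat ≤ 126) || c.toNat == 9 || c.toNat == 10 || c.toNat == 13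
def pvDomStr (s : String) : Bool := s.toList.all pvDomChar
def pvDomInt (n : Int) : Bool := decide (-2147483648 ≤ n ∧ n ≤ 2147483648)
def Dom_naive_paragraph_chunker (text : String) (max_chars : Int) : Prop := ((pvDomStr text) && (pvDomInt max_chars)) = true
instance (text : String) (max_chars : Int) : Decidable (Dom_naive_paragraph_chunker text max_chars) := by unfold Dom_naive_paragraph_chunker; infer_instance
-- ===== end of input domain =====

-- B re-chunks the same text in one fused pass: sentence pieces come from recorded cut
-- positions + slices instead of A's char-by-char accumulator, and the hard split is a
-- range comprehension instead of a while loop; equal return value whenever max_chars ≥ 1.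


-- ===== PORT A =====
-- ch in {'.', '?', '!'}
def pvDelim (c : Char) : Bool := c == '.' || c == '?' || c == '!'

-- the body of A's char-accumulating sentence loop (state: sentences so far, current)
def pvStepA (st : List (List Char) × List Char) (ch : Char) : List (List Char) × List Char :=
  let cur := st.2 ++ [ch]
  if pvDelim ch then
    let sent := PySem.Chars.strip cur
    ((if sent ≠ [] then st.1 ++ [sent] else st.1), [])
  else (st.1, cur)

-- A's hard-split while loop; the fuel only makes the same recursion total (Python
-- loops forever when max_chars ≤ 0; those inputs are outside Pre_).
def pvHardA (sent : List Char) (mx : Int) : Nat → Int → List (List Char)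
  | 0, _ => []
  | f + 1, start =>
      if start < (sent.length : Int) then
        PySem.Chars.strip (PySem.List.slice sent (some start) (some (start + mx)))
          :: pvHardA sent mx f (start + mx)
      else []

-- split_by_sentences, on the char-list side (PySem.Str.* are thin wrappers of Chars.*)
def pvSplitBySentences (t : List Char) (mx : Int) : List (List Char) :=
  if t = [] then []
  else
    let st := t.foldl pvStepA ([], [])
    let sentences :=
      if PySem.Chars.strip st.2 ≠ [] then st.1 ++ [PySem.Chars.strip st.2] else st.1
    sentences.foldl
      (fun acc sent =>
        if (sent.length : Int) ≤ mx then acc ++ [sent]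
        else acc ++ pvHardA sent mx (sent.length + 1) 0) []

def naive_paragraph_chunker (text : String) (max_chars : Int) : List String :=
  let paragraphs :=
    ((PySem.Chars.splitOn text.toList "\n\n".toList).filter
        (fun p => PySem.Chars.strip p ≠ [])).map PySem.Chars.strip
  (paragraphs.foldl
      (fun acc para =>
        if (para.length : Int) ≤ max_chars then acc ++ [para]
        else acc ++ pvSplitBySentences para max_chars) []).map String.ofList

-- ===== PORT B =====
-- the body of B's cut-position loop (state: raw pieces so far, start of current piece)
def pvStepB (para : List Char) (st : List (List Char) × Int) (p : Int × Char) : List (List Char) × Int :=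
  if pvDelim p.2 then
    (st.1 ++ [PySem.List.slice para (some st.2) (some (p.1 + 1))], p.1 + 1)
  else st

-- raw sentence pieces: cut positions recorded while enumerating, slices taken
def pvRawPieces (para : List Char) : List (List Char) :=
  let st := (PySem.List.enumerate para 0).foldl (pvStepB para) ([], 0)
  st.1 ++ [PySem.List.slice para (some st.2) none]

def naive_paragraph_chunker_alt (text : String) (max_chars : Int) : List String :=
  ((PySem.Chars.splitOn text.toList "\n\n".toList).foldl
      (fun acc piece =>
        let para := PySem.Chars.strip piece
        if para = [] then acc
        else if (para.length : Int) ≤ max_chars then acc ++ [para]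
        else
          (pvRawPieces para).foldl
            (fun acc2 r =>
              let sent := PySem.Chars.strip r
              if sent = [] then acc2
              else if (sent.length : Int) ≤ max_chars then acc2 ++ [sent]
              else acc2 ++ (PySem.List.pyRange 0 (sent.length : Int) max_chars).map
                  (fun j => PySem.Chars.strip
                      (PySem.List.slice sent (some j) (some (j + max_chars))))) acc) []).map
    String.ofList

-- ===== PRECONDITION & SPEC =====
-- Pre_ excludes max_chars ≤ 0: there Python A's hard-split while loop never advances, so A
-- loops forever on any text with a nonempty paragraph and returns (an empty list) only on
-- whitespace-only texts, where B returns [] as well.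
def Pre_naive_paragraph_chunker (text : String) (max_chars : Int) : Prop := 1 ≤ max_chars
instance (text : String) (max_chars : Int) : Decidable (Pre_naive_paragraph_chunker text max_chars) := by
  unfold Pre_naive_paragraph_chunker; infer_instance

def pvWitness_naive_paragraph_chunker : String × Int := ("Hi there. Bye!\n\nNext para", 6)

def Spec_naive_paragraph_chunker (text : String) (max_chars : Int) (out : List String) : Prop :=
  out = naive_paragraph_chunker_alt text max_chars
instance (text : String) (max_chars : Int) (out : List String) : Decidable (Spec_naive_paragraph_chunker text max_chars out) := by
  unfold Spec_naive_paragraph_chunker; infer_instance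

-- ===== CLAIM (what is proved, stated in full; the proofs are below) =====
def Claim_equal_naive_paragraph_chunker : Prop :=
  ∀ (text : String) (max_chars : Int), Dom_naive_paragraph_chunker text max_chars →
    Pre_naive_paragraph_chunker text max_chars →
    Spec_naive_paragraph_chunker text max_chars (naive_paragraph_chunker text max_chars)

-- ===== LEMMAS AND PROOFS =====

-- canonical raw sentence pieces (delimiter attached; trailing piece always present)
def pvPieces (cur : List Char) : List Char → List (List Char)
  | [] => [cur]
  | c :: cs => if pvDelim c then (cur ++ [c]) :: pvPieces [] cs else pvPieces (cur ++ [c]) cs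

-- A's scan produces exactly the stripped, nonempty canonical pieces
theorem scanA_eq (cs : List Char) : ∀ (acc : List (List Char)) (cur : List Char),
    (let st := cs.foldl pvStepA (acc, cur)
     if PySem.Chars.strip st.2 ≠ [] then st.1 ++ [PySem.Chars.strip st.2] else st.1)
    = acc ++ ((pvPieces cur cs).filter (fun p => PySem.Chars.strip p ≠ [])).map PySem.Chars.strip := by
  induction cs with
  | nil =>
      intro acc cur
      simp only [List.foldl_nil, pvPieces]
      by_cases h : PySem.Chars.strip cur = [] <;> simp [h]
  | cons c cs ih =>
      intro acc cur
      simp only [List.foldl_cons]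
      by_cases hd : pvDelim c
      · by_cases h : PySem.Chars.strip (cur ++ [c]) = []
        · have hs : pvStepA (acc, cur) c = (acc, []) := by simp [pvStepA, hd, h]
          rw [hs, ih]
          simp [pvPieces, hd, h]
        · have hs : pvStepA (acc, cur) c = (acc ++ [PySem.Chars.strip (cur ++ [c])], []) := by
            simp [pvStepA, hd, h]
          rw [hs, ih]
          simp [pvPieces, hd, h]
      · have hs : pvStepA (acc, cur) c = (acc, cur ++ [c]) := by simp [pvStepA, hd]
        rw [hs, ih]
        simp [pvPieces, hd]

-- B's scan produces exactly the canonical pieces (cut positions + slices)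
theorem scanB_eq (para : List Char) : ∀ (n i start : Nat) (acc : List (List Char)),
    n = para.length - i → start ≤ i → i ≤ para.length →
    (let st := (PySem.List.enumerate (para.drop i) (i : Int)).foldl (pvStepB para) (acc, (start : Int))
     st.1 ++ [PySem.List.slice para (some st.2) none])
    = acc ++ pvPieces ((para.drop start).take (i - start)) (para.drop i) := by
  intro n
  induction n with
  | zero =>
      intro i start acc hn hsi hil
      have hi : i = para.length := by omega
      subst hi
      simp only [List.drop_length, PySem.List.enumerate_nil, List.foldl_nil, pvPieces]
      rw [PySem.List.slice_from_natCast]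
      have : (para.drop start).take (para.length - start) = para.drop start := by
        apply List.take_of_length_le; simp
      rw [this]
  | succ n ih =>
      intro i start acc hn hsi hil
      by_cases hlt : i < para.length
      · rw [List.drop_eq_getElem_cons hlt, PySem.List.enumerate_cons, List.foldl_cons]
        have hcast : ((i : Int) + 1) = ((i + 1 : Nat) : Int) := by push_cast; ring
        have htake : (para.drop start).take (i + 1 - start) = (para.drop start).take (i - start) ++ [para[i]] := by
          have h1 : i + 1 - start = (i - start) + 1 := by omega
          rw [h1, List.take_add_one]
          have h2 : (para.drop start)[i - start]? = some para[i] := by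
            rw [List.getElem?_drop]
            have : start + (i - start) = i := by omega
            rw [this, List.getElem?_eq_getElem hlt]
          simp [h2]
        by_cases hd : pvDelim para[i]
        · have hs : pvStepB para (acc, (start : Int)) ((i : Int), para[i])
              = (acc ++ [PySem.List.slice para (some (start : Int)) (some ((i : Int) + 1))], (i : Int) + 1) := by
            simp [pvStepB, hd]
          rw [hs, hcast, ih (i + 1) (i + 1) _ (by omega) (by omega) (by omega)]
          rw [PySem.List.slice_natCast]
          simp [pvPieces, hd, htake]
        · have hs : pvStepB para (acc, (start : Int)) ((i : Int), para[i]) = (acc, (start : Int)) := by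
            simp [pvStepB, hd]
          rw [hs, hcast, ih (i + 1) start _ (by omega) (by omega) (by omega)]
          simp [pvPieces, hd, htake]
      · have hi : i = para.length := by omega
        subst hi
        simp only [List.drop_length, PySem.List.enumerate_nil, List.foldl_nil, pvPieces]
        rw [PySem.List.slice_from_natCast]
        have : (para.drop start).take (para.length - start) = para.drop start := by
          apply List.take_of_length_le; simp
        rw [this]

theorem rawPieces_eq (para : List Char) : pvRawPieces para = pvPieces [] para := by
  have h := scanB_eq para para.length 0 0 [] (by omega) (by omega) (by omega)
  simpa [pvRawPieces] using h

theorem pyRange_pos_nil (a b s : Int) (hs : 0 < s) (hab : b ≤ a) :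
    PySem.List.pyRange a b s = [] := by
  rw [PySem.List.pyRange_of_pos a b hs]
  simp [show ¬ a < b by omega]

theorem pyRange_pos_cons (a b s : Int) (hs : 0 < s) (hab : a < b) :
    PySem.List.pyRange a b s = a :: PySem.List.pyRange (a + s) b s := by
  rw [PySem.List.pyRange_of_pos a b hs, PySem.List.pyRange_of_pos (a+s) b hs]
  have key : ((b - a + s - 1) / s).toNat = (if a + s < b then ((b - (a+s) + s - 1) / s).toNat else 0) + 1 := by
    by_cases h2 : a + s < b
    · simp only [if_pos h2]
      have e1 : b - a + s - 1 = (b - (a+s) + s - 1) + 1 * s := by ring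
      rw [e1, Int.add_mul_ediv_right _ _ (by omega)]
      have : 0 ≤ (b - (a+s) + s - 1) / s := Int.ediv_nonneg (by omega) (by omega)
      omega
    · simp only [if_neg h2]
      have e1 : b - a + s - 1 = (b - a - 1) + 1 * s := by ring
      rw [e1, Int.add_mul_ediv_right _ _ (by omega)]
      have e2 : (b - a - 1) / s = 0 := Int.ediv_eq_zero_of_lt (by omega) (by omega)
      omega
  rw [if_pos hab, key, List.range_succ_eq_map, List.map_cons, List.map_map]
  congr 1
  · ring
  · apply List.map_congr_left
    intro k _
    simp [Function.comp, Nat.succ_eq_add_one]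
    ring

-- A's fuelled while loop is B's range comprehension
theorem hard_eq (sent : List Char) (mx : Int) (h : 1 ≤ mx) :
    ∀ (f : Nat) (start : Int), (sent.length : Int) ≤ start + (f : Int) * mx →
    pvHardA sent mx f start
      = (PySem.List.pyRange start (sent.length : Int) mx).map
          (fun j => PySem.Chars.strip (PySem.List.slice sent (some j) (some (j + mx)))) := by
  intro f
  induction f with
  | zero =>
      intro start hle
      rw [pyRange_pos_nil _ _ _ (by omega) (by simpa using hle)]
      rfl
  | succ f ih =>
      intro start hle
      by_cases hlt : start < (sent.length : Int)
      · rw [pvHardA, if_pos hlt, pyRange_pos_cons _ _ _ (by omega) hlt, List.map_cons,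
          ih (start + mx) (by
            have e : ((f + 1 : Nat) : Int) * mx = (f : Int) * mx + mx := by push_cast; ring
            omega)]
      · rw [pvHardA, if_neg hlt, pyRange_pos_nil _ _ _ (by omega) (by omega), List.map_nil]

-- strip-then-filter of the pieces, fused into a per-piece branch
theorem flatMap_strip_filter (L : List (List Char)) (g : List Char → List (List Char)) :
    ((L.filter (fun p => PySem.Chars.strip p ≠ [])).map PySem.Chars.strip).flatMap g
      = L.flatMap (fun p => if PySem.Chars.strip p = [] then []
          else g (PySem.Chars.strip p)) := by
  induction L with
  | nil => rfl
  | cons p L ih =>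
      simp only [Ne, decide_not] at ih
      by_cases hp : PySem.Chars.strip p = [] <;>
        simp [List.flatMap_cons, hp, ih]

-- B's inner per-piece loop body, rewritten in append form
theorem pvInnerStep_eq (mx : Int) : (fun (acc2 : List (List Char)) r =>
      let sent := PySem.Chars.strip r
      if sent = [] then acc2
      else if (sent.length : Int) ≤ mx then acc2 ++ [sent]
      else acc2 ++ (PySem.List.pyRange 0 (sent.length : Int) mx).map
          (fun j => PySem.Chars.strip (PySem.List.slice sent (some j) (some (j + mx)))))
      = fun acc2 r => acc2 ++ (if PySem.Chars.strip r = [] then []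
          else if ((PySem.Chars.strip r).length : Int) ≤ mx then [PySem.Chars.strip r]
          else (PySem.List.pyRange 0 ((PySem.Chars.strip r).length : Int) mx).map
            (fun j => PySem.Chars.strip (PySem.List.slice (PySem.Chars.strip r) (some j) (some (j + mx))))) := by
  funext acc2 r
  by_cases h1 : PySem.Chars.strip r = []
  · simp [h1]
  · by_cases h2 : ((PySem.Chars.strip r).length : Int) ≤ mx <;> simp [h1, h2]

-- starting the inner fold from acc just prepends acc
theorem innerShift (mx : Int) (raw : List (List Char)) (acc : List (List Char)) :
    raw.foldl
      (fun acc2 r =>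
        let sent := PySem.Chars.strip r
        if sent = [] then acc2
        else if (sent.length : Int) ≤ mx then acc2 ++ [sent]
        else acc2 ++ (PySem.List.pyRange 0 (sent.length : Int) mx).map
            (fun j => PySem.Chars.strip (PySem.List.slice sent (some j) (some (j + mx))))) acc
    = acc ++ raw.foldl
      (fun acc2 r =>
        let sent := PySem.Chars.strip r
        if sent = [] then acc2
        else if (sent.length : Int) ≤ mx then acc2 ++ [sent]
        else acc2 ++ (PySem.List.pyRange 0 (sent.length : Int) mx).map
            (fun j => PySem.Chars.strip (PySem.List.slice sent (some j) (some (j + mx))))) [] := by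
  rw [pvInnerStep_eq, PySem.List.foldl_append_eq_flatMap, PySem.List.foldl_append_eq_flatMap]
  simp

theorem sbs_eq (para : List Char) (mx : Int) (h : 1 ≤ mx) (hne : para ≠ []) :
    pvSplitBySentences para mx
      = (pvRawPieces para).foldl
          (fun acc2 r =>
            let sent := PySem.Chars.strip r
            if sent = [] then acc2
            else if (sent.length : Int) ≤ mx then acc2 ++ [sent]
            else acc2 ++ (PySem.List.pyRange 0 (sent.length : Int) mx).map
                (fun j => PySem.Chars.strip
                    (PySem.List.slice sent (some j) (some (j + mx))))) [] := by
  have hstepA : (fun (acc : List (List Char)) sent =>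
      if (sent.length : Int) ≤ mx then acc ++ [sent]
      else acc ++ pvHardA sent mx (sent.length + 1) 0)
      = fun acc sent => acc ++ (if (sent.length : Int) ≤ mx then [sent]
          else pvHardA sent mx (sent.length + 1) 0) := by
    funext acc sent; split <;> rfl
  have hstepB := pvInnerStep_eq mx
  rw [pvSplitBySentences, if_neg hne, hstepB, PySem.List.foldl_append_eq_flatMap, rawPieces_eq]
  simp only []
  rw [scanA_eq para [] [], hstepA, PySem.List.foldl_append_eq_flatMap]
  simp only [List.nil_append]
  rw [flatMap_strip_filter]
  congr 1
  funext r
  by_cases h1 : PySem.Chars.strip r = []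
  · simp [h1]
  · rw [if_neg h1, if_neg h1]
    by_cases h2 : ((PySem.Chars.strip r).length : Int) ≤ mx
    · rw [if_pos h2, if_pos h2]
    · rw [if_neg h2, if_neg h2]
      apply hard_eq _ _ h
      have e : (((PySem.Chars.strip r).length + 1 : Nat) : Int) * 1
          ≤ (((PySem.Chars.strip r).length + 1 : Nat) : Int) * mx :=
        mul_le_mul_of_nonneg_left h (by positivity)
      push_cast at e ⊢
      omega

-- ===== VERDICT (by name: the statement is the Claim_ definition above) =====
theorem naive_paragraph_chunker_spec : Claim_equal_naive_paragraph_chunker := by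
  intro text mx _ hpre
  simp only [Spec_naive_paragraph_chunker, naive_paragraph_chunker, naive_paragraph_chunker_alt]
  have h : (1 : Int) ≤ mx := hpre
  congr 1
  -- A's outer fold → flatMap over the pieces
  have hAstep : (fun (acc : List (List Char)) para =>
      if (para.length : Int) ≤ mx then acc ++ [para]
      else acc ++ pvSplitBySentences para mx)
      = fun acc para => acc ++ (if (para.length : Int) ≤ mx then [para]
          else pvSplitBySentences para mx) := by
    funext acc para; split <;> rfl
  -- B's outer fold → flatMap over the pieces
  have hBstep : (fun (acc : List (List Char)) piece =>
      let para := PySem.Chars.strip piece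
      if para = [] then acc
      else if (para.length : Int) ≤ mx then acc ++ [para]
      else
        (pvRawPieces para).foldl
          (fun acc2 r =>
            let sent := PySem.Chars.strip r
            if sent = [] then acc2
            else if (sent.length : Int) ≤ mx then acc2 ++ [sent]
            else acc2 ++ (PySem.List.pyRange 0 (sent.length : Int) mx).map
                (fun j => PySem.Chars.strip
                    (PySem.List.slice sent (some j) (some (j + mx))))) acc)
      = fun acc piece => acc ++ (if PySem.Chars.strip piece = [] then []
          else if ((PySem.Chars.strip piece).length : Int) ≤ mx then [PySem.Chars.strip piece]
          else pvSplitBySentences (PySem.Chars.strip piece) mx) := by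
    funext acc piece
    by_cases h1 : PySem.Chars.strip piece = []
    · simp [h1]
    · by_cases h2 : ((PySem.Chars.strip piece).length : Int) ≤ mx
      · simp [h1, h2]
      · simp only [h1, h2, if_false]
        rw [sbs_eq _ _ h h1, innerShift]
  rw [hAstep, hBstep, PySem.List.foldl_append_eq_flatMap, PySem.List.foldl_append_eq_flatMap]
  simp only [List.nil_append]
  rw [flatMap_strip_filter]
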